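-- pv_equiv track=rewrite | github.com/manucourtade/Guia-Practica- | guia_ejer_practicos/vec_bidimensionales/desafio_3/funciones.py | verificar_secuencia
-- ===== SOURCE A (Python) =====
-- def verificar_secuencia(matriz: list):
--     ocurrencias = 0
--     for fila in matriz:
--         for j in range(len(fila) - 2):  # hasta -2 para poder mirar j+2
--             if (fila[j] % 2 == 0 and fila[j+1] % 2 == 0 and fila[j+2] % 2 == 0):
--                 if fila[j] - fila[j+1] == 2 and fila[j+1] - fila[j+2] == 2:
--                     ocurrencias += 1
--     return ocurrencias
-- ===== SOURCE B (Python) =====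
-- def verificar_secuencia(matriz: list):
--     total = 0
--     for fila in matriz:
--         # stage 1: collect the lengths of maximal runs of adjacent "good" pairs
--         # (both even and descending by 2)
--         runs = []
--         run = 0
--         for a, b in zip(fila, fila[1:]):
--             if a % 2 == 0 and b % 2 == 0 and a - b == 2:
--                 run += 1
--             else:
--                 if run:
--                     runs.append(run)
--                 run = 0
--         if run:
--             runs.append(run)
--         # stage 2: a run of L consecutive good pairs contains L - 1 triples
--         total += sum(L - 1 for L in runs)
--     return total
-- ===== Notes on version B (the rewrite author's own statement) =====
-- stated objective: alternative
-- what changed: B never examines three-element windows: per row it first builds the list of lengths of maximal runs of adjacent even-descending-by-2 pairs, then adds L-1 triples for each run of length L, whereas A scans indexed 3-windows fila[j],fila[j+1],fila[j+2].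
import Mathlib
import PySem

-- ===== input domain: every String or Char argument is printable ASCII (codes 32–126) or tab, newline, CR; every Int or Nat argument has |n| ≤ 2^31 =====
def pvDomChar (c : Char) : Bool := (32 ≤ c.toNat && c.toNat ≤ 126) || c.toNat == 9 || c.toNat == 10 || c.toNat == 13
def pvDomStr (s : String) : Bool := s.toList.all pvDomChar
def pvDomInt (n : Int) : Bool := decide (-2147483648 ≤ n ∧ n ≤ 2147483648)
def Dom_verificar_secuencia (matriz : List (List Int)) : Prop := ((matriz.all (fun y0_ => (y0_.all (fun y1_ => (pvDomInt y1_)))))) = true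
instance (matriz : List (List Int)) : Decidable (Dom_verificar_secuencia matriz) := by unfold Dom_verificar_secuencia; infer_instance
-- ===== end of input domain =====

-- B replaces A's indexed 3-window scan by a staged run-length computation (collect
-- maximal runs of good adjacent pairs, then add L-1 per run); objective: alternative.

-- ===== PORT A =====
-- index j ranges over range(len(fila)-2), so j, j+1, j+2 are always in range: pyGetD's default is never used
def verificar_secuencia (matriz : List (List Int)) : Int :=
  matriz.foldl (fun ocurrencias fila =>
    (PySem.List.pyRange 0 ((fila.length : Int) - 2) 1).foldl (fun oc j =>
      if PySem.Int.mod (PySem.List.pyGetD fila j 0) 2 = 0 ∧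
         PySem.Int.mod (PySem.List.pyGetD fila (j+1) 0) 2 = 0 ∧
         PySem.Int.mod (PySem.List.pyGetD fila (j+2) 0) 2 = 0 then
        if PySem.List.pyGetD fila j 0 - PySem.List.pyGetD fila (j+1) 0 = 2 ∧
           PySem.List.pyGetD fila (j+1) 0 - PySem.List.pyGetD fila (j+2) 0 = 2 then
          oc + 1
        else oc
      else oc) ocurrencias) 0

-- ===== PORT B =====
def verificar_secuencia_alt (matriz : List (List Int)) : Int :=
  matriz.foldl (fun total fila =>
    -- stage 1: lengths of maximal runs of adjacent good pairs (state: runs so far, current run)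
    let s := (fila.zip (PySem.List.slice fila (some 1) none)).foldl
      (fun (s : List Int × Int) ab =>
        if PySem.Int.mod ab.1 2 == 0 && PySem.Int.mod ab.2 2 == 0 && ab.1 - ab.2 == 2
        then (s.1, s.2 + 1)
        else if s.2 ≠ 0 then (s.1 ++ [s.2], (0 : Int)) else (s.1, 0))
      ([], 0)
    let runs := if s.2 ≠ 0 then s.1 ++ [s.2] else s.1
    -- stage 2: a run of L good pairs contains L - 1 triples
    total + runs.foldl (fun acc L => acc + (L - 1)) 0) 0

-- ===== PRECONDITION & SPEC =====
def Spec_verificar_secuencia (matriz : List (List Int)) (out : Int) : Prop := out = verificar_secuencia_alt matriz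
instance (matriz : List (List Int)) (out : Int) : Decidable (Spec_verificar_secuencia matriz out) := by unfold Spec_verificar_secuencia; infer_instance

-- ===== CLAIM (what is proved, stated in full; the proofs are below) =====
def Claim_equal_verificar_secuencia : Prop := ∀ (matriz : List (List Int)), Dom_verificar_secuencia matriz → Spec_verificar_secuencia matriz (verificar_secuencia matriz)

-- ===== LEMMAS AND PROOFS =====

-- a pair (x, y) is "good": both even and descending by 2
def pvPair (x y : Int) : Bool := PySem.Int.mod x 2 == 0 && PySem.Int.mod y 2 == 0 && x - y == 2

-- structural triple count: the common characterisation of both rows' results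
def pvTri : List Int → Int
  | a :: b :: c :: rest => (if pvPair a b && pvPair b c then 1 else 0) + pvTri (b :: c :: rest)
  | _ => 0

-- count of consecutive good pairs, rolling over the pair list
def pvCnt : Bool → List (Int × Int) → Int
  | _, [] => 0
  | prev, ab :: rest => (if prev && pvPair ab.1 ab.2 then 1 else 0) + pvCnt (pvPair ab.1 ab.2) rest

-- rolling count over a list (to bridge pvCnt with pvTri)
def pvAux : Bool → List Int → Int
  | prev, a :: b :: rest => (if prev && pvPair a b then 1 else 0) + pvAux (pvPair a b) (b :: rest)
  | _, _ => 0

-- B's step and finalisation, named for the proofs (defeq to the port's inline code)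
def pvStep (s : List Int × Int) (ab : Int × Int) : List Int × Int :=
  if pvPair ab.1 ab.2 then (s.1, s.2 + 1)
  else if s.2 ≠ 0 then (s.1 ++ [s.2], (0 : Int)) else (s.1, 0)

def pvFin (s : List Int × Int) : List Int := if s.2 ≠ 0 then s.1 ++ [s.2] else s.1

def pvSum (rs : List Int) : Int := (rs.map (fun L => L - 1)).sum

lemma pvFoldSum : ∀ (rs : List Int) (acc : Int), rs.foldl (fun a L => a + (L - 1)) acc = acc + pvSum rs := by
  intro rs
  induction rs with
  | nil => intro acc; simp [pvSum]
  | cons L r ih => intro acc; simp [List.foldl_cons, ih, pvSum]; ring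

lemma pvAux_eq_tri_aux : ∀ (l : List Int) (a b : Int), pvAux (pvPair a b) (b :: l) = pvTri (a :: b :: l) := by
  intro l
  induction l with
  | nil => intro a b; simp [pvAux, pvTri]
  | cons c r ih =>
    intro a b
    simp only [pvAux, pvTri]
    rw [ih b c]

lemma pvAux_false (l : List Int) : pvAux false l = pvTri l := by
  match l with
  | [] => rfl
  | [a] => rfl
  | a :: b :: r => simp [pvAux, pvAux_eq_tri_aux r a b]

lemma pvCnt_zip : ∀ (l : List Int) (a : Int) (prev : Bool), pvCnt prev ((a :: l).zip l) = pvAux prev (a :: l) := by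
  intro l
  induction l with
  | nil => intro a prev; rfl
  | cons b r ih =>
    intro a prev
    simp only [List.zip_cons_cons, pvCnt, pvAux]
    rw [ih b]

-- run-length invariant: finalised sum of (L-1) over runs counts the consecutive good pairs
lemma pvStep_inv : ∀ (ps : List (Int × Int)) (rs : List Int) (r : Int), 0 ≤ r →
    pvSum (pvFin (ps.foldl pvStep (rs, r))) = pvSum (pvFin (rs, r)) + pvCnt (decide (r ≠ 0)) ps := by
  intro ps
  induction ps with
  | nil => intro rs r _; simp [pvCnt]
  | cons ab ps ih =>
    intro rs r hr
    simp only [List.foldl_cons, pvCnt]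
    by_cases h : pvPair ab.1 ab.2 = true
    · have hstep : pvStep (rs, r) ab = (rs, r + 1) := by simp [pvStep, h]
      rw [hstep, ih rs (r + 1) (by omega), h]
      have h1 : (decide (r + 1 ≠ 0)) = true := by simp; omega
      rw [h1]
      by_cases hr0 : r = 0
      · subst hr0; simp [pvFin, pvSum]
      · have : (decide (r ≠ 0)) = true := by simp [hr0]
        simp only [this, Bool.true_and, if_true]
        simp only [pvFin, pvSum, if_pos (by omega : r + 1 ≠ 0), if_pos hr0]
        simp [List.map_append, List.sum_append]
        ring
    · have hb : pvPair ab.1 ab.2 = false := by simpa using h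
      have hstep : pvStep (rs, r) ab = (pvFin (rs, r), 0) := by
        simp only [pvStep, hb, Bool.false_eq_true, if_false, pvFin]
        split <;> rfl
      rw [hstep, ih _ 0 le_rfl, hb]
      simp [pvFin]

lemma pvB_row (fila : List Int) (t : Int) :
    (t + (pvFin ((fila.zip (PySem.List.slice fila (some 1) none)).foldl pvStep ([], 0))).foldl
        (fun acc L => acc + (L - 1)) 0) = t + pvTri fila := by
  rw [pvFoldSum, PySem.List.slice_from_one]
  match fila with
  | [] => simp [pvFin, pvSum, pvTri]
  | a :: l =>
    rw [List.tail_cons]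
    have := pvStep_inv ((a :: l).zip l) [] 0 le_rfl
    
    rw [this]
    have : (decide ((0:Int) ≠ 0)) = false := by simp
    rw [pvCnt_zip l a _, this] at *
    simp only [pvFin, pvSum, if_neg (by simp : ¬ (0:Int) ≠ 0)]
    simp only [List.map_nil, List.sum_nil, zero_add]
    rw [pvAux_false]

lemma pvCond (a b c oc : Int) :
    (if PySem.Int.mod a 2 = 0 ∧ PySem.Int.mod b 2 = 0 ∧ PySem.Int.mod c 2 = 0 then
       if a - b = 2 ∧ b - c = 2 then oc + 1 else oc
     else oc) = if pvPair a b && pvPair b c then oc + 1 else oc := by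
  simp only [pvPair, Bool.and_eq_true, beq_iff_eq]
  split_ifs <;> first | rfl | tauto

-- A's fold, rewritten over List.range with List.getD
lemma pvA_range : ∀ (fila : List Int) (oc : Int),
    (List.range (fila.length - 2)).foldl (fun oc k =>
      if PySem.Int.mod (fila.getD k 0) 2 = 0 ∧
         PySem.Int.mod (fila.getD (k+1) 0) 2 = 0 ∧
         PySem.Int.mod (fila.getD (k+2) 0) 2 = 0 then
        if fila.getD k 0 - fila.getD (k+1) 0 = 2 ∧
           fila.getD (k+1) 0 - fila.getD (k+2) 0 = 2 then
          oc + 1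
        else oc
      else oc) oc = oc + pvTri fila := by
  intro fila
  induction fila with
  | nil => intro oc; simp [pvTri]
  | cons a l ih =>
    intro oc
    match l with
    | [] => simp [pvTri]
    | [b] => simp [pvTri]
    | b :: c :: r =>
      have hlen : (a :: b :: c :: r).length - 2 = (r.length + 1) := by simp
      rw [hlen, List.range_succ_eq_map, List.foldl_cons, List.foldl_map]
      have hfun : (fun (oc : Int) (k : Nat) =>
          if PySem.Int.mod ((a :: b :: c :: r).getD (k+1) 0) 2 = 0 ∧
             PySem.Int.mod ((a :: b :: c :: r).getD (k+1+1) 0) 2 = 0 ∧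
             PySem.Int.mod ((a :: b :: c :: r).getD (k+1+2) 0) 2 = 0 then
            if (a :: b :: c :: r).getD (k+1) 0 - (a :: b :: c :: r).getD (k+1+1) 0 = 2 ∧
               (a :: b :: c :: r).getD (k+1+1) 0 - (a :: b :: c :: r).getD (k+1+2) 0 = 2 then
              oc + 1
            else oc
          else oc) = (fun (oc : Int) (k : Nat) =>
          if PySem.Int.mod ((b :: c :: r).getD k 0) 2 = 0 ∧
             PySem.Int.mod ((b :: c :: r).getD (k+1) 0) 2 = 0 ∧
             PySem.Int.mod ((b :: c :: r).getD (k+2) 0) 2 = 0 then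
            if (b :: c :: r).getD k 0 - (b :: c :: r).getD (k+1) 0 = 2 ∧
               (b :: c :: r).getD (k+1) 0 - (b :: c :: r).getD (k+2) 0 = 2 then
              oc + 1
            else oc
          else oc) := by
        funext oc k
        have e2 : k + 1 + 2 = (k + 2) + 1 := by omega
        rw [e2]
        simp only [List.getD_cons_succ]
      simp only [Nat.succ_eq_add_one]
      rw [hfun]
      have hlen2 : r.length = (b :: c :: r).length - 2 := by simp
      rw [hlen2, ih]
      have g0 : (a :: b :: c :: r).getD 0 0 = a := rfl
      have g1 : (a :: b :: c :: r).getD (0+1) 0 = b := rfl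
      have g2 : (a :: b :: c :: r).getD (0+2) 0 = c := rfl
      simp only [g0, g1, g2, pvCond]
      simp only [pvTri]
      split <;> ring

lemma pvA_row : ∀ (fila : List Int) (oc : Int),
    (PySem.List.pyRange 0 ((fila.length : Int) - 2) 1).foldl (fun oc j =>
      if PySem.Int.mod (PySem.List.pyGetD fila j 0) 2 = 0 ∧
         PySem.Int.mod (PySem.List.pyGetD fila (j+1) 0) 2 = 0 ∧
         PySem.Int.mod (PySem.List.pyGetD fila (j+2) 0) 2 = 0 then
        if PySem.List.pyGetD fila j 0 - PySem.List.pyGetD fila (j+1) 0 = 2 ∧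
           PySem.List.pyGetD fila (j+1) 0 - PySem.List.pyGetD fila (j+2) 0 = 2 then
          oc + 1
        else oc
      else oc) oc = oc + pvTri fila := by
  intro fila oc
  rw [PySem.List.pyRange_one]
  have hn : (((fila.length : Int) - 2) - 0).toNat = fila.length - 2 := by omega
  rw [hn, List.foldl_map]
  have hfun : (fun (oc : Int) (k : Nat) =>
      if PySem.Int.mod (PySem.List.pyGetD fila ((0:Int) + (k:Int)) 0) 2 = 0 ∧
         PySem.Int.mod (PySem.List.pyGetD fila ((0:Int) + (k:Int) + 1) 0) 2 = 0 ∧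
         PySem.Int.mod (PySem.List.pyGetD fila ((0:Int) + (k:Int) + 2) 0) 2 = 0 then
        if PySem.List.pyGetD fila ((0:Int) + (k:Int)) 0 - PySem.List.pyGetD fila ((0:Int) + (k:Int) + 1) 0 = 2 ∧
           PySem.List.pyGetD fila ((0:Int) + (k:Int) + 1) 0 - PySem.List.pyGetD fila ((0:Int) + (k:Int) + 2) 0 = 2 then
          oc + 1
        else oc
      else oc) = (fun (oc : Int) (k : Nat) =>
      if PySem.Int.mod (fila.getD k 0) 2 = 0 ∧
         PySem.Int.mod (fila.getD (k+1) 0) 2 = 0 ∧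
         PySem.Int.mod (fila.getD (k+2) 0) 2 = 0 then
        if fila.getD k 0 - fila.getD (k+1) 0 = 2 ∧
           fila.getD (k+1) 0 - fila.getD (k+2) 0 = 2 then
          oc + 1
        else oc
      else oc) := by
    funext oc k
    have e2 : ((k:Int) + 1) = ((k+1 : Nat) : Int) := by push_cast; ring
    have e3 : ((k:Int) + 2) = ((k+2 : Nat) : Int) := by push_cast; ring
    rw [show (0:Int) + (k:Int) = ((k:Nat):Int) from by ring]
    rw [e2, e3]
    simp only [PySem.List.pyGetD_natCast]
  rw [hfun, pvA_range]

theorem pv_main : ∀ (matriz : List (List Int)), verificar_secuencia matriz = verificar_secuencia_alt matriz := by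
  intro matriz
  unfold verificar_secuencia verificar_secuencia_alt
  induction matriz using List.reverseRecOn with
  | nil => rfl
  | append_singleton ms fila ih =>
    simp only [List.foldl_append, List.foldl_cons, List.foldl_nil]
    rw [ih, pvA_row]
    exact (pvB_row fila _).symm

-- ===== VERDICT (by name: the statement is the Claim_ definition above) =====
theorem verificar_secuencia_spec : Claim_equal_verificar_secuencia := by
  intro matriz _
  unfold Spec_verificar_secuencia
  exact pv_main matriz
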